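-- pv_equiv track=rewrite | github.com/Jangmalza/Friendly | backend/app/distributed/worker.py | _merge_parallel_source_code_candidates
-- ===== SOURCE A (Python) =====
-- from typing import Any, Dict, List, Optional, Set, Tuple
--
-- def _merge_parallel_source_code_candidates(
--     candidates: Dict[str, Dict[str, Any]],
--     expected_roles: List[str],
-- ) -> Dict[str, str]:
--     merged_source: Dict[str, str] = {}
--     conflict_paths: List[str] = []
--
--     for role in expected_roles:
--         payload = candidates.get(role) or {}
--         source_code = payload.get("source_code")
--         if not isinstance(source_code, dict):
--             continue
--
--         for raw_path, raw_content in source_code.items():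
--             path = str(raw_path).strip()
--             if not path:
--                 continue
--             content = raw_content if isinstance(raw_content, str) else str(raw_content)
--
--             if path not in merged_source:
--                 merged_source[path] = content
--                 continue
--
--             if merged_source[path] == content:
--                 continue
--
--             # Prefer richer candidate content when the same path conflicts.
--             if len(content) > len(merged_source[path]):
--                 merged_source[path] = content
--             conflict_paths.append(path)
--
--     if conflict_paths:
--         unique_conflicts = sorted(set(conflict_paths))
--         merged_source["parallel_merge_conflicts.log"] = (
--             "Conflicting files resolved by longest-content preference:\n"
--             + "\n".join(unique_conflicts)
--         )
--
--     if not merged_source: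
--         merged_source["error.log"] = "병렬 개발 결과가 비어 있습니다."
--
--     return merged_source
-- ===== SOURCE B (Python) =====
-- def _merge_parallel_source_code_candidates(candidates, expected_roles):
--     # Two-pass merge: group every candidate content per path, then resolve each
--     # path once (first longest wins; conflict iff the contents are not all equal).
--     groups = {}
--     for role in expected_roles:
--         payload = candidates.get(role) or {}
--         source_code = payload.get("source_code")
--         if not isinstance(source_code, dict):
--             continue
--         for raw_path, raw_content in source_code.items():
--             path = str(raw_path).strip()
--             if not path:
--                 continue
--             content = raw_content if isinstance(raw_content, str) else str(raw_content)
--             groups.setdefault(path, []).append(content)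
--
--     merged_source = {path: max(contents, key=len) for path, contents in groups.items()}
--     conflicts = sorted(path for path, contents in groups.items() if len(set(contents)) > 1)
--
--     if conflicts:
--         merged_source["parallel_merge_conflicts.log"] = (
--             "Conflicting files resolved by longest-content preference:\n"
--             + "\n".join(conflicts)
--         )
--     if not merged_source:
--         merged_source["error.log"] = "병렬 개발 결과가 비어 있습니다."
--     return merged_source
-- ===== Notes on version B (the rewrite author's own statement) =====
-- stated objective: alternative
-- what changed: B replaces A's incremental resolve-while-scanning merge by a two-pass decomposition: first group all candidate contents per stripped path, then resolve each path once with max(contents, key=len) and flag it as a conflict iff its contents are not all identical.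
import Mathlib
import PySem

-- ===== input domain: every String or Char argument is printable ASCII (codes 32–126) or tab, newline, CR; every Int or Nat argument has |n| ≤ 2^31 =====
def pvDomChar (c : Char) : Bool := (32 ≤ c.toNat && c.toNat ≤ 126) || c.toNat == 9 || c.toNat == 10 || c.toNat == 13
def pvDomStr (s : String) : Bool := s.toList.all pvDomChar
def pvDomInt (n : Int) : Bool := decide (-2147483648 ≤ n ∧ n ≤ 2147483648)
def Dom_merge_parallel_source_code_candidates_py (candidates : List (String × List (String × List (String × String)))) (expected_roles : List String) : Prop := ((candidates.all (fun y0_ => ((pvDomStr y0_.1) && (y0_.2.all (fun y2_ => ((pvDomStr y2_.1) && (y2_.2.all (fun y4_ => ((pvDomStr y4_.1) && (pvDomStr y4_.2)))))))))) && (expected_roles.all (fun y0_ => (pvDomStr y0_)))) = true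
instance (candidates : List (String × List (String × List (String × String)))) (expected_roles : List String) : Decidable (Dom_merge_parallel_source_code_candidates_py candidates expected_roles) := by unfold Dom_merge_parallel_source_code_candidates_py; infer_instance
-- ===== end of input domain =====

-- B replaces A's resolve-while-scanning merge by group-contents-per-path, then resolve each
-- path once (first longest wins, conflict iff not all contents equal); same cost, alternative
-- decomposition.

-- ===== PORT A =====
-- Literal port of A: one pass; first occurrence inserts, later occurrences are resolved
-- in place (strictly longer content replaces, any differing content records a conflict).
-- ('isinstance(source_code, dict)' is vacuous under the declared type: a present
-- "source_code" value IS a dict here, so only the missing-key case skips.)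
def merge_parallel_source_code_candidates_py (candidates : List (String × List (String × List (String × String)))) (expected_roles : List String) : List (String × String) :=
  let cd := PySem.Dict.ofList candidates
  let st := expected_roles.foldl (fun st role =>
    let payload := cd.getD role []
    match (PySem.Dict.ofList payload).get? "source_code" with
    | none => st
    | some source_code =>
      (PySem.Dict.ofList source_code).items.foldl (fun st rc =>
        let path := PySem.Str.strip rc.1
        if path = "" then st
        else
          if st.1.contains path = false then (st.1.insert path rc.2, st.2)
          else if st.1.getD path "" = rc.2 then st
          else if PySem.Str.len rc.2 > PySem.Str.len (st.1.getD path "") then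
            (st.1.insert path rc.2, st.2 ++ [path])
          else (st.1, st.2 ++ [path])) st)
    ((PySem.Dict.empty : PySem.Dict String String), ([] : List String))
  let merged := if st.2 ≠ [] then
      st.1.insert "parallel_merge_conflicts.log"
        ("Conflicting files resolved by longest-content preference:\n" ++
          PySem.Str.join "\n" (PySem.List.sorted (PySem.Set.ofList st.2) (fun x => x) false))
    else st.1
  let merged := if merged.items = [] then merged.insert "error.log" "병렬 개발 결과가 비어 있습니다." else merged
  merged.items

-- ===== PORT B =====
-- Literal port of B: pass 1 groups every content per stripped path
-- (groups.setdefault(path, []).append(content) = Dict.modify); pass 2 resolves each path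
-- with max(contents, key=len) and collects the conflicted paths.
def merge_parallel_source_code_candidates_py_alt (candidates : List (String × List (String × List (String × String)))) (expected_roles : List String) : List (String × String) :=
  let cd := PySem.Dict.ofList candidates
  let groups := expected_roles.foldl (fun g role =>
    let payload := cd.getD role []
    match (PySem.Dict.ofList payload).get? "source_code" with
    | none => g
    | some source_code =>
      (PySem.Dict.ofList source_code).items.foldl (fun g rc =>
        let path := PySem.Str.strip rc.1
        if path = "" then g
        else g.modify path [] (fun cs => cs ++ [rc.2])) g)
    (PySem.Dict.empty : PySem.Dict String (List String))
  -- {path: max(contents, key=len) for path, contents in groups.items()}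
  -- (group lists are never empty, so the .getD "" default of max? is never taken)
  let merged := groups.items.foldl
    (fun d pc => d.insert pc.1 ((PySem.List.max? pc.2 PySem.Str.len).getD "")) PySem.Dict.empty
  -- sorted(path for path, contents in groups.items() if len(set(contents)) > 1)
  let conflicts := PySem.List.sorted
    ((groups.items.filter (fun pc => 1 < PySem.Set.len (PySem.Set.ofList pc.2))).map (fun pc => pc.1))
    (fun x => x) false
  let merged := if conflicts ≠ [] then
      merged.insert "parallel_merge_conflicts.log"
        ("Conflicting files resolved by longest-content preference:\n" ++
          PySem.Str.join "\n" conflicts)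
    else merged
  let merged := if merged.items = [] then merged.insert "error.log" "병렬 개발 결과가 비어 있습니다." else merged
  merged.items

-- ===== PRECONDITION & SPEC =====
def Spec_merge_parallel_source_code_candidates_py (candidates : List (String × List (String × List (String × String)))) (expected_roles : List String) (out : List (String × String)) : Prop := out = merge_parallel_source_code_candidates_py_alt candidates expected_roles
instance (candidates : List (String × List (String × List (String × String)))) (expected_roles : List String) (out : List (String × String)) : Decidable (Spec_merge_parallel_source_code_candidates_py candidates expected_roles out) := by unfold Spec_merge_parallel_source_code_candidates_py; infer_instance

-- ===== CLAIM (what is proved, stated in full; the proofs are below) =====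
def Claim_equal_merge_parallel_source_code_candidates_py : Prop := ∀ (candidates : List (String × List (String × List (String × String)))) (expected_roles : List String), Dom_merge_parallel_source_code_candidates_py candidates expected_roles → Spec_merge_parallel_source_code_candidates_py candidates expected_roles (merge_parallel_source_code_candidates_py candidates expected_roles)

-- ===== LEMMAS AND PROOFS =====

-- The stream of (stripped path, content) events contributed by one role.
def pvEv (cd : PySem.Dict String (List (String × List (String × String)))) (role : String) : List (String × String) :=
  match (PySem.Dict.ofList (cd.getD role [])).get? "source_code" with
  | none => []
  | some source_code =>
    ((PySem.Dict.ofList source_code).items.map (fun rc => (PySem.Str.strip rc.1, rc.2))).filter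
      (fun e => decide (¬ e.1 = ""))

def pvEvents (candidates : List (String × List (String × List (String × String)))) (expected_roles : List String) : List (String × String) :=
  expected_roles.flatMap (pvEv (PySem.Dict.ofList candidates))

-- All contents seen for path p, in order.
def pvContents (es : List (String × String)) (p : String) : List String :=
  (es.filter (fun e => e.1 == p)).map (fun e => e.2)

def pvPick (m y : String) : String := if PySem.Str.len m < PySem.Str.len y then y else m

def pvBestL : List String → Option String
  | [] => none
  | x :: t => some (t.foldl pvPick x)

-- A's per-event core step (events already stripped and non-empty).
def pvStep (st : PySem.Dict String String × List String) (e : String × String) : PySem.Dict String String × List String :=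
  if st.1.contains e.1 = false then (st.1.insert e.1 e.2, st.2)
  else if st.1.getD e.1 "" = e.2 then st
  else if PySem.Str.len e.2 > PySem.Str.len (st.1.getD e.1 "") then
    (st.1.insert e.1 e.2, st.2 ++ [e.1])
  else (st.1, st.2 ++ [e.1])

def pvA (es : List (String × String)) : PySem.Dict String String × List String :=
  es.foldl pvStep (PySem.Dict.empty, [])

def pvG (es : List (String × String)) : PySem.Dict String (List String) :=
  es.foldl (fun g e => g.modify e.1 [] (fun cs => cs ++ [e.2])) PySem.Dict.empty

-- the common tail of port A after its loop
def pvOutA (st : PySem.Dict String String × List String) : List (String × String) :=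
  let merged := if st.2 ≠ [] then
      st.1.insert "parallel_merge_conflicts.log"
        ("Conflicting files resolved by longest-content preference:\n" ++
          PySem.Str.join "\n" (PySem.List.sorted (PySem.Set.ofList st.2) (fun x => x) false))
    else st.1
  let merged := if merged.items = [] then merged.insert "error.log" "병렬 개발 결과가 비어 있습니다." else merged
  merged.items

-- the tail of port B after its grouping loop
def pvOutB (groups : PySem.Dict String (List String)) : List (String × String) :=
  let merged := groups.items.foldl
    (fun d pc => d.insert pc.1 ((PySem.List.max? pc.2 PySem.Str.len).getD "")) PySem.Dict.empty
  let conflicts := PySem.List.sorted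
    ((groups.items.filter (fun pc => 1 < PySem.Set.len (PySem.Set.ofList pc.2))).map (fun pc => pc.1))
    (fun x => x) false
  let merged := if conflicts ≠ [] then
      merged.insert "parallel_merge_conflicts.log"
        ("Conflicting files resolved by longest-content preference:\n" ++
          PySem.Str.join "\n" conflicts)
    else merged
  let merged := if merged.items = [] then merged.insert "error.log" "병렬 개발 결과가 비어 있습니다." else merged
  merged.items

-- the nested loop of either port is the fold of its core step over the event stream
theorem pvLoop_eq {σ : Type} (step : σ → (String × String) → σ)
    (cd : PySem.Dict String (List (String × List (String × String)))) (roles : List String) (init : σ) :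
    roles.foldl (fun st role =>
      match (PySem.Dict.ofList (cd.getD role [])).get? "source_code" with
      | none => st
      | some source_code =>
        (PySem.Dict.ofList source_code).items.foldl (fun st rc =>
          let path := PySem.Str.strip rc.1
          if path = "" then st else step st (path, rc.2)) st) init
    = (roles.flatMap (pvEv cd)).foldl step init := by
  induction roles generalizing init with
  | nil => rfl
  | cons r rs ih =>
    simp only [List.foldl_cons, List.flatMap_cons, List.foldl_append]
    rw [← ih]
    congr 1
    unfold pvEv
    cases h : (PySem.Dict.ofList (cd.getD r [])).get? "source_code" with
    | none => simp
    | some sc =>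
      simp only
      rw [← PySem.List.foldl_ite_eq_foldl_filter (p := fun e : String × String => ¬ e.1 = "") step
        ((PySem.Dict.ofList sc).items.map (fun rc => (PySem.Str.strip rc.1, rc.2))) init,
        List.foldl_map]
      simp only [ite_not]

theorem pvContents_append (es : List (String × String)) (e : String × String) (p : String) :
    pvContents (es ++ [e]) p = pvContents es p ++ (if e.1 = p then [e.2] else []) := by
  unfold pvContents
  rw [List.filter_append, List.map_append]
  by_cases h : e.1 = p <;> simp [h]

theorem pvPick_cases (x y : String) : pvPick x y = x ∨ pvPick x y = y := by
  unfold pvPick; split <;> simp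

theorem pvBestNE_mem (x : String) (t : List String) : t.foldl pvPick x ∈ x :: t := by
  induction t generalizing x with
  | nil => simp
  | cons c t ih =>
    simp only [List.foldl_cons]
    rcases List.mem_cons.mp (ih (pvPick x c)) with h1 | h1
    · rcases pvPick_cases x c with h2 | h2 <;> rw [h1, h2] <;> simp
    · simp [h1]

theorem pvPick_pos {m c : String} (h : PySem.Str.len m < PySem.Str.len c) : pvPick m c = c := by
  simp only [pvPick, if_pos h]

theorem pvPick_neg {m c : String} (h : ¬ PySem.Str.len m < PySem.Str.len c) : pvPick m c = m := by
  simp only [pvPick, if_neg h]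

theorem pvPick_self (m : String) : pvPick m m = m := pvPick_neg (lt_irrefl _)

theorem pvMax?_aux (g : Option String → String → Option String)
    (hg : ∀ m c, g (some m) c = if PySem.Str.len m < PySem.Str.len c then some c else some m)
    (t : List String) : ∀ m : String, t.foldl g (some m) = some (t.foldl pvPick m) := by
  induction t with
  | nil => intro m; rfl
  | cons c t ih =>
    intro m
    rw [List.foldl_cons, List.foldl_cons, hg,
      show (if PySem.Str.len m < PySem.Str.len c then some c else some m) = some (pvPick m c) from by
        by_cases h : PySem.Str.len m < PySem.Str.len c
        · rw [if_pos h, pvPick_pos h]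
        · rw [if_neg h, pvPick_neg h]]
    exact ih (pvPick m c)

theorem pvMax?_cons (x : String) (t : List String) :
    PySem.List.max? (x :: t) PySem.Str.len = some (t.foldl pvPick x) := by
  unfold PySem.List.max?
  rw [List.foldl_cons]
  exact pvMax?_aux _ (fun m c => rfl) t x

theorem pvOfList_nil_iff {α : Type} [BEq α] [LawfulBEq α] (cs : List α) :
    PySem.Set.ofList cs = [] ↔ cs = [] := by
  rw [List.eq_nil_iff_forall_not_mem, List.eq_nil_iff_forall_not_mem]
  constructor <;> intro h x hx <;> exact h x (by simpa [PySem.Set.mem_ofList] using hx)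

theorem pvSetLen_iff (cs : List String) :
    (1 < PySem.Set.len (PySem.Set.ofList cs)) ↔ (∃ a ∈ cs, ∃ b ∈ cs, a ≠ b) := by
  have hnd := PySem.Set.nodup_ofList cs
  have hmem : ∀ y, y ∈ PySem.Set.ofList cs ↔ y ∈ cs := fun y => PySem.Set.mem_ofList cs y
  unfold PySem.Set.len
  rcases h : PySem.Set.ofList cs with _ | ⟨u, _ | ⟨v, w⟩⟩
  · constructor
    · intro hlt; simp at hlt
    · rintro ⟨a, ha, -⟩
      rw [← hmem a, h] at ha; simp at ha
  · constructor
    · intro hlt; simp at hlt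
    · rintro ⟨a, ha, b, hb, hab⟩
      rw [← hmem a, h] at ha; rw [← hmem b, h] at hb
      simp at ha hb; exact absurd (ha.trans hb.symm) hab
  · constructor
    · intro _
      rw [h] at hnd
      have huv : u ≠ v := by
        have := List.nodup_cons.mp hnd
        intro he; exact this.1 (he ▸ List.mem_cons_self ..)
      exact ⟨u, (hmem u).mp (h ▸ List.mem_cons_self ..),
             v, (hmem v).mp (h ▸ List.mem_cons.mpr (Or.inr (List.mem_cons_self ..))), huv⟩
    · intro _
      simp only [List.length_cons]
      push_cast
      omega

theorem pvG_getD (es : List (String × String)) (p : String) :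
    (pvG es).getD p [] = pvContents es p := by
  unfold pvG pvContents
  rw [PySem.Dict.getD_foldl_modify_append]
  simp

-- the main invariant of A's single pass, phrased against the grouped contents
theorem pvInv (es : List (String × String)) :
    (∀ p, (pvA es).1.get? p = pvBestL (pvContents es p)) ∧
    (pvA es).1.keys = (pvG es).keys ∧
    (pvA es).1.keys.Nodup ∧
    (∀ p, p ∈ (pvA es).2 ↔ ∃ a ∈ pvContents es p, ∃ b ∈ pvContents es p, a ≠ b) := by
  induction es using List.reverseRecOn with
  | nil =>
    refine ⟨fun p => ?_, ?_, ?_, fun p => ?_⟩ <;>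
      simp [pvA, pvG, pvContents, pvBestL, PySem.Dict.get?_empty, PySem.Dict.keys_empty]
  | append_singleton es e ih =>
    obtain ⟨ih1, ih2, ih3, ih4⟩ := ih
    have hA : pvA (es ++ [e]) = pvStep (pvA es) e := by
      unfold pvA; rw [List.foldl_append]; rfl
    have hG : pvG (es ++ [e]) = (pvG es).modify e.1 [] (fun cs => cs ++ [e.2]) := by
      unfold pvG; rw [List.foldl_append]; rfl
    have hGd : (pvG es).getD e.1 [] = pvContents es e.1 := pvG_getD es e.1
    have hcont : (pvA es).1.contains e.1 = (pvBestL (pvContents es e.1)).isSome := by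
      rw [PySem.Dict.contains_eq_isSome_get?, ih1]
    have hGcont : (pvG es).contains e.1 = (pvA es).1.contains e.1 := by
      rw [Bool.eq_iff_iff, PySem.Dict.contains_iff_mem_keys, PySem.Dict.contains_iff_mem_keys, ih2]
    rcases hcs : pvContents es e.1 with _ | ⟨y, t⟩
    · -- first occurrence of this path: both sides append a fresh key
      have hc : (pvA es).1.contains e.1 = false := by rw [hcont, hcs]; rfl
      have hstep : pvStep (pvA es) e = ((pvA es).1.insert e.1 e.2, (pvA es).2) := by
        unfold pvStep; rw [hc]; simp
      have hnm : e.1 ∉ (pvA es).1.keys := by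
        rw [← PySem.Dict.contains_iff_mem_keys, hc]; simp
      refine ⟨fun p => ?_, ?_, ?_, fun p => ?_⟩
      · rw [hA, hstep, pvContents_append]
        by_cases hp : p = e.1
        · subst hp
          rw [PySem.Dict.get?_insert]
          simp [hcs, pvBestL]
        · rw [PySem.Dict.get?_insert, if_neg hp, ih1]
          have : ¬ e.1 = p := fun h => hp h.symm
          simp [this]
      · rw [hA, hstep, hG, PySem.Dict.modify,
          PySem.Dict.keys_insert_of_not_contains _ _ hc,
          PySem.Dict.keys_insert_of_not_contains _ _ (by rw [hGcont]; exact hc), ih2]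
      · rw [hA, hstep, PySem.Dict.keys_insert_of_not_contains _ _ hc]
        exact List.Nodup.append ih3 (List.nodup_singleton _)
          (fun a ha hb => hnm ((List.mem_singleton.mp hb) ▸ ha))
      · rw [hA, hstep, pvContents_append]
        by_cases hp : e.1 = p
        · subst hp
          rw [hcs]
          simp only [List.nil_append]
          constructor
          · intro hmem
            exact absurd ((ih4 e.1).mp hmem) (by rw [hcs]; rintro ⟨a, ha, -⟩; simp at ha)
          · rintro ⟨a, ha, b, hb, hab⟩
            simp at ha hb; exact absurd (ha.trans hb.symm) hab
        · simp only [if_neg hp, List.append_nil]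
          exact ih4 p
    · -- the path was seen before: A resolves in place, B appends to the group
      have hc : (pvA es).1.contains e.1 = true := by rw [hcont, hcs]; rfl
      have hgd : (pvA es).1.getD e.1 "" = t.foldl pvPick y := by
        rw [PySem.Dict.getD_eq_get?_getD, ih1, hcs]; rfl
      have hbm : t.foldl pvPick y ∈ pvContents es e.1 := by rw [hcs]; exact pvBestNE_mem y t
      have hGkeys : (pvG (es ++ [e])).keys = (pvG es).keys := by
        rw [hG, PySem.Dict.modify, PySem.Dict.keys_insert_of_contains _ _ (by rw [hGcont]; exact hc)]
      -- best of the extended group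
      have hbest' : pvBestL (pvContents (es ++ [e]) e.1) = some (pvPick (t.foldl pvPick y) e.2) := by
        rw [pvContents_append, hcs, if_pos rfl]
        show some ((t ++ [e.2]).foldl pvPick y) = _
        rw [List.foldl_append]; rfl
      by_cases h1 : (pvA es).1.getD e.1 "" = e.2
      · -- identical content: A does nothing
        have hstep : pvStep (pvA es) e = pvA es := by
          unfold pvStep
          rw [hc, if_neg (show ¬((true : Bool) = false) by simp), if_pos h1]
        have he2 : e.2 = t.foldl pvPick y := by rw [← h1, hgd]
        have hpick : pvPick (t.foldl pvPick y) e.2 = t.foldl pvPick y := by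
          rw [he2]; exact pvPick_self _
        refine ⟨fun p => ?_, ?_, ?_, fun p => ?_⟩
        · rw [hA, hstep]
          by_cases hp : p = e.1
          · subst hp; rw [hbest', hpick, ih1, hcs]; rfl
          · rw [ih1, pvContents_append, if_neg (fun h => hp h.symm), List.append_nil]
        · rw [hA, hstep, hGkeys]; exact ih2
        · rw [hA, hstep]; exact ih3
        · rw [hA, hstep]
          by_cases hp : e.1 = p
          · subst hp
            rw [ih4, pvContents_append, if_pos rfl]
            constructor
            · rintro ⟨a, ha, b, hb, hab⟩
              exact ⟨a, List.mem_append_left _ ha, b, List.mem_append_left _ hb, hab⟩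
            · rintro ⟨a, ha, b, hb, hab⟩
              rcases List.mem_append.mp ha with ha' | ha' <;>
                rcases List.mem_append.mp hb with hb' | hb'
              · exact ⟨a, ha', b, hb', hab⟩
              · simp at hb'
                exact ⟨a, ha', t.foldl pvPick y, hcs ▸ hbm, fun h => hab (by rw [h, ← hgd, h1, hb'])⟩
              · simp at ha'
                exact ⟨t.foldl pvPick y, hcs ▸ hbm, b, hb', fun h => hab (by rw [← h, ← hgd, h1, ha'])⟩
              · simp at ha' hb'; exact absurd (ha'.trans hb'.symm) hab
          · rw [ih4, pvContents_append, if_neg hp, List.append_nil]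
      · -- conflicting content: A records the conflict (and keeps the longer content)
        have hdiff : t.foldl pvPick y ≠ e.2 := by rw [← hgd]; exact h1
        have hcps : (pvStep (pvA es) e).2 = (pvA es).2 ++ [e.1] := by
          unfold pvStep
          rw [hc, if_neg (show ¬((true : Bool) = false) by simp), if_neg h1]
          split <;> rfl
        have hconf : ∀ p, p ∈ (pvStep (pvA es) e).2 ↔
            (∃ a ∈ pvContents (es ++ [e]) p, ∃ b ∈ pvContents (es ++ [e]) p, a ≠ b) := by
          intro p
          rw [hcps, pvContents_append]
          by_cases hp : e.1 = p
          · subst hp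
            rw [if_pos rfl]
            constructor
            · intro _
              exact ⟨t.foldl pvPick y, List.mem_append_left _ (hcs ▸ hbm),
                     e.2, List.mem_append_right _ (by simp), hdiff⟩
            · intro _; simp
          · simp only [if_neg hp, List.append_nil]
            rw [List.mem_append]
            simp only [List.mem_singleton]
            constructor
            · rintro (hm | he)
              · exact (ih4 p).mp hm
              · exact absurd he.symm hp
            · intro hpair; exact Or.inl ((ih4 p).mpr hpair)
        by_cases h2 : PySem.Str.len e.2 > PySem.Str.len ((pvA es).1.getD e.1 "")
        · have hstep : pvStep (pvA es) e = ((pvA es).1.insert e.1 e.2, (pvA es).2 ++ [e.1]) := by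
            unfold pvStep
            rw [hc, if_neg (show ¬((true : Bool) = false) by simp), if_neg h1, if_pos h2]
          have hpick : pvPick (t.foldl pvPick y) e.2 = e.2 := by
            have h2' := h2
            rw [hgd] at h2'
            exact pvPick_pos h2'
          refine ⟨fun p => ?_, ?_, ?_, fun p => ?_⟩
          · rw [hA, hstep]
            by_cases hp : p = e.1
            · subst hp
              rw [PySem.Dict.get?_insert, if_pos rfl, hbest', hpick]
            · rw [PySem.Dict.get?_insert, if_neg hp, ih1, pvContents_append,
                if_neg (fun h => hp h.symm), List.append_nil]
          · rw [hA, hstep, hGkeys]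
            simpa [PySem.Dict.keys_insert_of_contains _ _ hc] using ih2
          · rw [hA, hstep]
            simpa [PySem.Dict.keys_insert_of_contains _ _ hc] using ih3
          · rw [hA]; exact hconf p
        · have hstep : pvStep (pvA es) e = ((pvA es).1, (pvA es).2 ++ [e.1]) := by
            unfold pvStep
            rw [hc, if_neg (show ¬((true : Bool) = false) by simp), if_neg h1, if_neg h2]
          have hpick : pvPick (t.foldl pvPick y) e.2 = t.foldl pvPick y := by
            have h2' := h2
            rw [hgd] at h2'
            exact pvPick_neg h2'
          refine ⟨fun p => ?_, ?_, ?_, fun p => ?_⟩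
          · rw [hA, hstep]
            by_cases hp : p = e.1
            · subst hp; rw [hbest', hpick, ih1, hcs]; rfl
            · rw [ih1, pvContents_append, if_neg (fun h => hp h.symm), List.append_nil]
          · rw [hA, hstep, hGkeys]; exact ih2
          · rw [hA, hstep]; exact ih3
          · rw [hA]; exact hconf p

set_option maxHeartbeats 2000000 in
theorem portA_eq (candidates : List (String × List (String × List (String × String)))) (roles : List String) :
    merge_parallel_source_code_candidates_py candidates roles = pvOutA (pvA (pvEvents candidates roles)) := by
  exact congrArg pvOutA
    (pvLoop_eq pvStep (PySem.Dict.ofList candidates) roles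
      ((PySem.Dict.empty : PySem.Dict String String), ([] : List String)))

set_option maxHeartbeats 2000000 in
theorem portB_eq (candidates : List (String × List (String × List (String × String)))) (roles : List String) :
    merge_parallel_source_code_candidates_py_alt candidates roles = pvOutB (pvG (pvEvents candidates roles)) := by
  exact congrArg pvOutB
    (pvLoop_eq (fun g e => g.modify e.1 [] (fun cs => cs ++ [e.2]))
      (PySem.Dict.ofList candidates) roles (PySem.Dict.empty : PySem.Dict String (List String)))

theorem pvOut_eq (es : List (String × String)) : pvOutA (pvA es) = pvOutB (pvG es) := by
  obtain ⟨ih1, ih2, ih3, ih4⟩ := pvInv es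
  have hGnodup : (pvG es).keys.Nodup := ih2 ▸ ih3
  -- the resolved dictionaries agree (items, hence as dictionaries)
  have hmergedB : (List.foldl
      (fun d pc => d.insert pc.1 ((PySem.List.max? pc.2 PySem.Str.len).getD "")) PySem.Dict.empty
      (pvG es).items) = (pvA es).1 := by
    apply PySem.Dict.ext
    rw [PySem.Dict.items_foldl_insert_fresh _ _ _ _ (fun a _ => by simp [PySem.Dict.contains_empty])
      (by simpa [PySem.Dict.keys] using hGnodup)]
    rw [PySem.Dict.items_eq_map_keys _ hGnodup ([] : List String),
      PySem.Dict.items_eq_map_keys _ ih3 ("" : String), ih2]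
    simp only [PySem.Dict.empty, List.nil_append, List.map_map]
    apply List.map_congr_left
    intro k hk
    have hkA : (pvA es).1.contains k = true := by
      rw [PySem.Dict.contains_iff_mem_keys, ih2]; exact hk
    rw [PySem.Dict.contains_eq_isSome_get?, ih1] at hkA
    rcases hcs : pvContents es k with _ | ⟨y, t⟩
    · rw [hcs] at hkA; simp [pvBestL] at hkA
    · simp only [Function.comp]
      rw [pvG_getD, hcs, pvMax?_cons]
      rw [PySem.Dict.getD_eq_get?_getD, ih1, hcs]
      rfl
  -- the conflict lists agree
  have hconfl : PySem.List.sorted (PySem.Set.ofList (pvA es).2) (fun x => x) false =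
      PySem.List.sorted
        (((pvG es).items.filter (fun pc => decide (1 < PySem.Set.len (PySem.Set.ofList pc.2)))).map
          (fun pc => pc.1)) (fun x => x) false := by
    apply PySem.List.sorted_eq_sorted_of_perm _ _ (fun x => x) (fun a b h => h)
    rw [List.perm_ext_iff_of_nodup (PySem.Set.nodup_ofList _)]
    · intro x
      rw [PySem.Set.mem_ofList, ih4 x]
      constructor
      · rintro ⟨a, ha, b, hb, hab⟩
        have hxk : (pvA es).1.contains x = true := by
          rw [PySem.Dict.contains_eq_isSome_get?, ih1]
          rcases hcs : pvContents es x with _ | _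
          · rw [hcs] at ha; simp at ha
          · rfl
        have hxG : (pvG es).get? x = some (pvContents es x) := by
          have hxGk : (pvG es).contains x = true := by
            rw [Bool.eq_iff_iff, PySem.Dict.contains_iff_mem_keys]
            rw [PySem.Dict.contains_iff_mem_keys, ih2] at hxk
            simp [hxk]
          rw [PySem.Dict.contains_eq_isSome_get?] at hxGk
          rcases hsome : (pvG es).get? x with _ | cs
          · rw [hsome] at hxGk; simp at hxGk
          · have h3 := PySem.Dict.getD_eq_get?_getD (pvG es) x ([] : List String)
            rw [hsome, pvG_getD] at h3
            have h4 : pvContents es x = cs := by simpa using h3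
            rw [h4]
        rw [List.mem_map]
        refine ⟨(x, pvContents es x), ?_, rfl⟩
        rw [List.mem_filter]
        refine ⟨(PySem.Dict.get?_eq_some_iff_mem_items _ _ _ hGnodup).mp hxG, ?_⟩
        simp only [decide_eq_true_eq]
        exact (pvSetLen_iff _).mpr ⟨a, ha, b, hb, hab⟩
      · intro hx
        rw [List.mem_map] at hx
        obtain ⟨pc, hpc, hpcx⟩ := hx
        rw [List.mem_filter] at hpc
        have := (PySem.Dict.get?_eq_some_iff_mem_items _ pc.1 pc.2 hGnodup).mpr (by
          rw [show (pc.1, pc.2) = pc by rfl]; exact hpc.1)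
        have hval : pc.2 = pvContents es pc.1 := by
          have h2 := PySem.Dict.getD_eq_get?_getD (pvG es) pc.1 ([] : List String)
          rw [this, pvG_getD] at h2
          exact h2.symm
        have hlen := hpc.2
        simp only [decide_eq_true_eq] at hlen
        rw [hval, hpcx] at hlen
        exact (pvSetLen_iff _).mp hlen
    · -- the filtered key list has no duplicates
      have : (((pvG es).items.filter
          (fun pc => decide (1 < PySem.Set.len (PySem.Set.ofList pc.2)))).map (fun pc => pc.1)).Sublist
          ((pvG es).items.map (fun pc => pc.1)) :=
        List.Sublist.map _ List.filter_sublist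
      exact (by simpa [PySem.Dict.keys] using hGnodup : ((pvG es).items.map (fun pc => pc.1)).Nodup).sublist this
  -- assemble: rewrite B's tail into A's state, then split on the conflict test
  simp only [pvOutA, pvOutB]
  rw [hmergedB, ← hconfl]
  by_cases hc2 : (pvA es).2 = []
  · have hs : PySem.List.sorted (PySem.Set.ofList (pvA es).2) (fun x => x) false = [] :=
      (PySem.List.sorted_eq_nil_iff _ _ _).mpr ((pvOfList_nil_iff _).mpr hc2)
    simp [hc2, PySem.List.sorted_eq_nil_iff]
  · have hs : ¬ PySem.List.sorted (PySem.Set.ofList (pvA es).2) (fun x => x) false = [] := fun h =>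
      hc2 ((pvOfList_nil_iff _).mp ((PySem.List.sorted_eq_nil_iff _ _ _).mp h))
    simp [hc2, hs]

-- ===== VERDICT (by name: the statement is the Claim_ definition above) =====
theorem merge_parallel_source_code_candidates_py_spec : Claim_equal_merge_parallel_source_code_candidates_py := by
  intro candidates roles _
  unfold Spec_merge_parallel_source_code_candidates_py
  rw [portA_eq, portB_eq, pvOut_eq]
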